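-- pv_equiv track=rewrite | github.com/bbrucee/ECE573_HW2 | Q1/Q1.py | shell7
-- ===== SOURCE A (Python) =====
-- def shell7(input_array):
--     comparisons = 0
--     for i in range(7, len(input_array)):
--         key = input_array[i]
--         j = i
--         while j >= 7 and input_array[j - 7] > key:
--             comparisons += 1
--             input_array[j] = input_array[j - 7]
--             j -= 7
--         comparisons += 1
--         input_array[j] = key
--     return comparisons
-- ===== SOURCE B (Python) =====
-- def shell7(input_array):
--     # Counts gap-7 inversion pairs directly instead of simulating the in-place
--     # shifting sort; returns the same comparison count but does NOT sort the list.
--     n = len(input_array)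
--     inv = 0
--     for j in range(n):
--         for i in range(j % 7, j, 7):
--             if input_array[i] > input_array[j]:
--                 inv += 1
--     return inv + max(n - 7, 0)
-- ===== Notes on version B (the rewrite author's own statement) =====
-- stated objective: simpler
-- what changed: Replaces the in-place gap-7 shifting insertion sort with a pure double loop that counts gap-7 inversion pairs and adds the closed-form n-7 term (B does not mutate the input list; A sorts it in place).
import Mathlib
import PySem

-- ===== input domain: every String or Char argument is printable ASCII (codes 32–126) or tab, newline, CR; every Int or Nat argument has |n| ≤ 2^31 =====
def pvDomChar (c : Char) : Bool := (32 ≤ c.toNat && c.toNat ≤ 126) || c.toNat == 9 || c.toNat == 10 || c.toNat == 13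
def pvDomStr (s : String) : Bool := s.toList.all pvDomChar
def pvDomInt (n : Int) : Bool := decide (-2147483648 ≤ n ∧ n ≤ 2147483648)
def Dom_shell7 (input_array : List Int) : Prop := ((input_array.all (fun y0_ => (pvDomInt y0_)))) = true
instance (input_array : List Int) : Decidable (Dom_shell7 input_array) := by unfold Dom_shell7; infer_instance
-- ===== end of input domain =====

-- B replaces A's in-place gap-7 shifting insertion sort by a pure double loop counting
-- gap-7 inversion pairs plus the closed-form (n-7) term; equivalence is about the RETURN
-- value only (A sorts the list in place, B does not mutate it).

-- ===== PORT A =====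
-- A's inner while loop: 'while j >= 7 and input_array[j-7] > key: …'.
-- All indices A uses are nonnegative and in range, so List.getD/List.set are exact here.
def shell7Inner (arr : List Int) (key : Int) (j : Nat) (comp : Int) : List Int × Int :=
  if h : 7 ≤ j ∧ key < arr.getD (j - 7) 0 then
    shell7Inner (arr.set j (arr.getD (j - 7) 0)) key (j - 7) (comp + 1)
  else
    (arr.set j key, comp + 1)
termination_by j
decreasing_by omega

-- A's outer loop: 'for i in range(7, len(input_array))' threading (array, comparisons).
def shell7 (input_array : List Int) : Int :=
  ((List.range' 7 (input_array.length - 7)).foldl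
    (fun st i => shell7Inner st.1 (st.1.getD i 0) i st.2)
    (input_array, (0 : Int))).2

-- ===== PORT B =====
-- Python's range(j % 7, j, 7) has exactly j / 7 elements j%7, j%7+7, …;
-- List.range' (j % 7) (j / 7) 7 is that same list.
def shell7_alt (input_array : List Int) : Int :=
  let n := input_array.length
  let inv := (List.range n).foldl
    (fun acc j =>
      (List.range' (j % 7) (j / 7) 7).foldl
        (fun a i =>
          if decide (input_array.getD j 0 < input_array.getD i 0) then a + 1 else a)
        acc)
    (0 : Int)
  inv + max ((n : Int) - 7) 0

-- ===== PRECONDITION & SPEC =====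
def Spec_shell7 (input_array : List Int) (out : Int) : Prop := out = shell7_alt input_array
instance (input_array : List Int) (out : Int) : Decidable (Spec_shell7 input_array out) := by unfold Spec_shell7; infer_instance

-- ===== CLAIM (what is proved, stated in full; the proofs are below) =====
def Claim_equal_shell7 : Prop := ∀ (input_array : List Int), Dom_shell7 input_array → Spec_shell7 input_array (shell7 input_array)

-- ===== LEMMAS AND PROOFS =====

-- values of arr on the gap-7 chain of residue r, at positions r, r+7, …, r+7*(t-1)
def chain (arr : List Int) (r t : Nat) : List Int :=
  (List.range t).map (fun s => arr.getD (r + 7 * s) 0)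

-- number of chain elements strictly greater than k
def cGT (k : Int) (vs : List Int) : Nat := vs.countP (fun v => decide (k < v))

-- stable sorted insert (after equals), matching A's strict shifting condition
def sIns (k : Int) : List Int → List Int
  | [] => [k]
  | x :: xs => if k < x then k :: x :: xs else x :: sIns k xs

-- A-side running total of per-step shift counts over the original list
def Asum (l : List Int) (i : Nat) : Int :=
  ((List.range i).map (fun q => (cGT (l.getD q 0) (chain l (q % 7) (q / 7)) : Int))).sum

lemma sIns_append_gt (k v : Int) (vs : List Int) (h : k < v) :
    sIns k (vs ++ [v]) = sIns k vs ++ [v] := by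
  induction vs with
  | nil => simp [sIns, h]
  | cons x xs ih => by_cases hx : k < x <;> simp [sIns, hx, ih]

lemma sIns_eq_append (k : Int) (vs : List Int) (h : ∀ x ∈ vs, ¬ k < x) :
    sIns k vs = vs ++ [k] := by
  induction vs with
  | nil => simp [sIns]
  | cons x xs ih =>
      have hx := h x (by simp)
      simp [sIns, hx]
      exact ih (fun y hy => h y (by simp [hy]))

lemma sIns_perm (k : Int) (vs : List Int) : (sIns k vs).Perm (k :: vs) := by
  induction vs with
  | nil => simp [sIns]
  | cons x xs ih =>
      by_cases hx : k < x
      · simp [sIns, hx]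
      · simp only [sIns, hx, if_false]
        exact (ih.cons x).trans (List.Perm.swap k x xs)

lemma mem_sIns (k y : Int) (vs : List Int) : y ∈ sIns k vs ↔ y = k ∨ y ∈ vs := by
  have := (sIns_perm k vs).mem_iff (a := y)
  simpa using this

lemma sIns_pairwise (k : Int) (vs : List Int) (h : vs.Pairwise (· ≤ ·)) :
    (sIns k vs).Pairwise (· ≤ ·) := by
  induction vs with
  | nil => simp [sIns]
  | cons x xs ih =>
      rcases List.pairwise_cons.1 h with ⟨hx, hxs⟩
      by_cases hk : k < x
      · simp only [sIns, if_pos hk]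
        refine List.pairwise_cons.2 ⟨?_, h⟩
        intro y hy
        rcases List.mem_cons.1 hy with hy | hy
        · omega
        · exact le_trans (le_of_lt hk) (hx y hy)
      · simp only [sIns, hk, if_false]
        refine List.pairwise_cons.2 ⟨?_, ih hxs⟩
        intro y hy
        rcases (mem_sIns k y xs).1 hy with hy | hy
        · omega
        · exact hx y hy

lemma chain_succ (arr : List Int) (r t : Nat) :
    chain arr r (t + 1) = chain arr r t ++ [arr.getD (r + 7 * t) 0] := by
  simp [chain, List.range_succ]

lemma chain_congr (arr arr' : List Int) (r t : Nat)
    (h : ∀ s, s < t → arr'.getD (r + 7 * s) 0 = arr.getD (r + 7 * s) 0) :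
    chain arr' r t = chain arr r t := by
  simp only [chain]
  exact List.map_congr_left (fun s hs => h s (List.mem_range.1 hs))

lemma getD_set_ne (arr : List Int) (j k : Nat) (v : Int) (h : k ≠ j) :
    (arr.set j v).getD k 0 = arr.getD k 0 := by
  simp [List.getD, List.getElem?_set_ne (Ne.symm h)]

lemma getD_set_eq (arr : List Int) (j : Nat) (v : Int) (h : j < arr.length) :
    (arr.set j v).getD j 0 = v := by
  simp [List.getD, h]

-- main inner-loop lemma: on a sorted chain, the while loop performs exactly
-- (number of chain elements greater than key) shifts and inserts key stably.
lemma inner_spec (t : Nat) : ∀ (r : Nat) (arr : List Int) (key comp : Int),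
    r < 7 → r + 7 * t < arr.length → (chain arr r t).Pairwise (· ≤ ·) →
    (shell7Inner arr key (r + 7 * t) comp).2 = comp + 1 + (cGT key (chain arr r t) : Int)
    ∧ (shell7Inner arr key (r + 7 * t) comp).1.length = arr.length
    ∧ (∀ k : Nat, (∀ s, s ≤ t → k ≠ r + 7 * s) →
        (shell7Inner arr key (r + 7 * t) comp).1.getD k 0 = arr.getD k 0)
    ∧ chain (shell7Inner arr key (r + 7 * t) comp).1 r (t + 1) = sIns key (chain arr r t) := by
  induction t with
  | zero =>
      intro r arr key comp hr hlen _
      have hcond : ¬ (7 ≤ r + 7 * 0 ∧ key < arr.getD (r + 7 * 0 - 7) 0) := by omega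
      rw [shell7Inner, dif_neg hcond]
      refine ⟨by simp [chain, cGT], by simp, ?_, ?_⟩
      · intro k hk
        exact getD_set_ne arr _ k key (by have := hk 0 (by omega); omega)
      · rw [chain_succ, getD_set_eq arr _ key hlen]
        simp [chain, sIns]
  | succ t ih =>
      intro r arr key comp hr hlen hsort
      have hj : r + 7 * (t + 1) - 7 = r + 7 * t := by omega
      set j := r + 7 * (t + 1) with hjdef
      have hjt : r + 7 * t < j := by omega
      set v := arr.getD (r + 7 * t) 0 with hv
      have hchain : chain arr r (t + 1) = chain arr r t ++ [v] := chain_succ arr r t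
      by_cases hcmp : key < v
      · have hcond : 7 ≤ j ∧ key < arr.getD (j - 7) 0 := by
          refine ⟨by omega, ?_⟩; rw [hj]; exact hcmp
        rw [shell7Inner, dif_pos hcond]
        rw [hj]
        set arr' := arr.set j (arr.getD (r + 7 * t) 0) with harr'
        have harrlen : arr'.length = arr.length := by simp [harr']
        have hpres : ∀ s, s < t → arr'.getD (r + 7 * s) 0 = arr.getD (r + 7 * s) 0 := by
          intro s hs; exact getD_set_ne arr j _ _ (by omega)
        have hchain' : chain arr' r t = chain arr r t := chain_congr arr arr' r t hpres
        have hsort' : (chain arr' r t).Pairwise (· ≤ ·) := by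
          rw [hchain']
          rw [hchain] at hsort
          exact (List.pairwise_append.1 hsort).1
        have hlen' : r + 7 * t < arr'.length := by omega
        obtain ⟨ihc, ihl, ihp, ihch⟩ := ih r arr' key (comp + 1) hr hlen' hsort'
        set res := shell7Inner arr' key (r + 7 * t) (comp + 1) with hres
        have hresj : res.1.getD j 0 = v := by
          have := ihp j (by intro s hs; omega)
          rw [this, harr']
          exact getD_set_eq arr j _ (by omega)
        refine ⟨?_, by omega, ?_, ?_⟩
        · -- count
          rw [ihc, hchain', hchain]
          have : cGT key (chain arr r t ++ [v]) = cGT key (chain arr r t) + 1 := by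
            simp [cGT, List.countP_append, hcmp]
          rw [this]; push_cast; ring
        · intro k hk
          have h1 := ihp k (fun s hs => hk s (by omega))
          rw [h1, harr']
          exact getD_set_ne arr j k _ (by have := hk (t + 1) (le_refl _); omega)
        · -- chain of res at t+2
          have h2 : chain res.1 r (t + 2) = chain res.1 r (t + 1) ++ [res.1.getD (r + 7 * (t + 1)) 0] :=
            chain_succ res.1 r (t + 1)
          rw [h2, ihch, hchain', hchain]
          rw [show r + 7 * (t + 1) = j from rfl, hresj]
          exact (sIns_append_gt key v (chain arr r t) hcmp).symm
      · have hcond : ¬ (7 ≤ j ∧ key < arr.getD (j - 7) 0) := by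
          rw [hj]; intro h; exact hcmp h.2
        rw [shell7Inner, dif_neg hcond]
        have hall : ∀ x ∈ chain arr r (t + 1), ¬ key < x := by
          rw [hchain]
          intro x hx
          rcases List.mem_append.1 hx with hx | hx
          · rw [hchain] at hsort
            have := (List.pairwise_append.1 hsort).2.2 x hx v (by simp)
            omega
          · simp at hx; omega
        refine ⟨?_, by simp, ?_, ?_⟩
        · have : cGT key (chain arr r (t + 1)) = 0 := by
            simp only [cGT, List.countP_eq_zero]
            intro x hx; simpa using hall x hx
          rw [this]; simp
        · intro k hk
          exact getD_set_ne arr j k key (by have := hk (t + 1) (le_refl _); omega)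
        · have h2 : chain (arr.set j key) r (t + 2)
              = chain (arr.set j key) r (t + 1) ++ [(arr.set j key).getD (r + 7 * (t + 1)) 0] :=
            chain_succ _ r (t + 1)
          have h3 : chain (arr.set j key) r (t + 1) = chain arr r (t + 1) :=
            chain_congr arr _ r (t + 1) (fun s hs => getD_set_ne arr j _ key (by omega))
          rw [h2, h3, show r + 7 * (t + 1) = j from rfl, getD_set_eq arr j key (by omega)]
          exact (sIns_eq_append key (chain arr r (t + 1)) hall).symm

-- chain-prefix length of residue r below bound i
def cnt (r i : Nat) : Nat := (i - r + 6) / 7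

lemma Asum_succ (l : List Int) (i : Nat) :
    Asum l (i + 1) = Asum l i + (cGT (l.getD i 0) (chain l (i % 7) (i / 7)) : Int) := by
  simp [Asum, List.range_succ]

lemma Asum_of_le7 (l : List Int) (i : Nat) (h : i ≤ 7) : Asum l i = 0 := by
  simp only [Asum]
  apply List.sum_eq_zero
  intro x hx
  simp only [List.mem_map, List.mem_range] at hx
  obtain ⟨q, hq, rfl⟩ := hx
  have : q / 7 = 0 := by omega
  simp [this, chain, cGT]

-- outer-loop invariant: after m steps the count is (m) + inversions-so-far, every
-- residue chain below 7+m is a sorted permutation of the original one, and the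
-- rest of the array is untouched.
lemma outer_inv (l : List Int) (m : Nat) (hm : 7 + m ≤ l.length) :
    ((List.range' 7 m).foldl (fun st i => shell7Inner st.1 (st.1.getD i 0) i st.2)
      (l, (0 : Int))).1.length = l.length
    ∧ (∀ k : Nat, 7 + m ≤ k →
        ((List.range' 7 m).foldl (fun st i => shell7Inner st.1 (st.1.getD i 0) i st.2)
          (l, (0 : Int))).1.getD k 0 = l.getD k 0)
    ∧ (∀ r : Nat, r < 7 →
        (chain ((List.range' 7 m).foldl (fun st i => shell7Inner st.1 (st.1.getD i 0) i st.2)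
          (l, (0 : Int))).1 r (cnt r (7 + m))).Pairwise (· ≤ ·)
        ∧ (chain ((List.range' 7 m).foldl (fun st i => shell7Inner st.1 (st.1.getD i 0) i st.2)
          (l, (0 : Int))).1 r (cnt r (7 + m))).Perm (chain l r (cnt r (7 + m))))
    ∧ ((List.range' 7 m).foldl (fun st i => shell7Inner st.1 (st.1.getD i 0) i st.2)
        (l, (0 : Int))).2 = ((7 + m : Nat) : Int) - 7 + Asum l (7 + m) := by
  induction m with
  | zero =>
      refine ⟨rfl, fun k _ => rfl, ?_, ?_⟩
      · intro r hr
        have : cnt r 7 = 1 := by unfold cnt; omega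
        simp [this, chain]
      · simp [Asum_of_le7 l 7 (le_refl _)]
  | succ m ih =>
      have hm' : 7 + m ≤ l.length := by omega
      obtain ⟨ihl, ihp, ihch, ihc⟩ := ih hm'
      set st := (List.range' 7 m).foldl (fun st i => shell7Inner st.1 (st.1.getD i 0) i st.2)
        (l, (0 : Int)) with hst
      set i := 7 + m with hi
      have hstep : (List.range' 7 (m + 1)).foldl
          (fun st i => shell7Inner st.1 (st.1.getD i 0) i st.2) (l, (0 : Int))
          = shell7Inner st.1 (st.1.getD i 0) i st.2 := by
        rw [List.range'_concat, List.foldl_append, ← hst]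
        simp only [List.foldl_cons, List.foldl_nil, one_mul]
        rfl
      set r := i % 7 with hr
      set t := i / 7 with ht
      have hrt : i = r + 7 * t := by omega
      have hr7 : r < 7 := by omega
      have hcntr : cnt r i = t := by unfold cnt; omega
      have hkey : st.1.getD i 0 = l.getD i 0 := ihp i (le_refl _)
      have hlen : r + 7 * t < st.1.length := by omega
      have hsort : (chain st.1 r t).Pairwise (· ≤ ·) := by
        have := (ihch r hr7).1; rwa [hcntr] at this
      obtain ⟨c1, c2, c3, c4⟩ := inner_spec t r st.1 (st.1.getD i 0) st.2 hr7 hlen hsort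
      rw [← hrt] at c1 c2 c3 c4
      set res := shell7Inner st.1 (st.1.getD i 0) i st.2 with hresd
      refine ⟨?_, ?_, ?_, ?_⟩
      · rw [hstep]; omega
      · intro k hk
        rw [hstep]
        have h1 := c3 k (by intro s hs; omega)
        rw [h1]; exact ihp k (by omega)
      · intro r' hr'
        rw [hstep]
        by_cases hrr : r' = r
        · subst hrr
          have hcnt1 : cnt r (7 + (m + 1)) = t + 1 := by unfold cnt; omega
          rw [hcnt1]
          have hchres : chain res.1 r (t + 1) = sIns (st.1.getD i 0) (chain st.1 r t) := c4
          constructor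
          · rw [hchres]; exact sIns_pairwise _ _ hsort
          · have hperm1 : (chain res.1 r (t + 1)).Perm (st.1.getD i 0 :: chain st.1 r t) := by
              rw [hchres]; exact sIns_perm _ _
            have hperm2 : (chain st.1 r t).Perm (chain l r t) := by
              have := (ihch r hr7).2; rwa [hcntr] at this
            have htail : chain l r (t + 1) = chain l r t ++ [l.getD i 0] := by
              rw [chain_succ, ← hrt]
            rw [htail]
            refine hperm1.trans ?_
            rw [hkey]
            exact ((hperm2.cons (l.getD i 0)).trans (List.perm_append_singleton _ _).symm)
        · have hcnt2 : cnt r' (7 + (m + 1)) = cnt r' (7 + m) := by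
            unfold cnt; omega
          rw [hcnt2]
          have hpres : ∀ s, s < cnt r' (7 + m) →
              res.1.getD (r' + 7 * s) 0 = st.1.getD (r' + 7 * s) 0 := by
            intro s hs
            apply c3
            intro s' hs'
            omega
          have hcheq : chain res.1 r' (cnt r' (7 + m)) = chain st.1 r' (cnt r' (7 + m)) :=
            chain_congr st.1 res.1 r' _ hpres
          rw [hcheq]
          exact ihch r' hr'
      · rw [hstep, c1, ihc]
        have hcg : cGT (st.1.getD i 0) (chain st.1 r t) = cGT (l.getD i 0) (chain l r t) := by
          rw [hkey]
          have hperm2 : (chain st.1 r t).Perm (chain l r t) := by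
            have := (ihch r hr7).2; rwa [hcntr] at this
          simp [cGT, hperm2.countP_eq]
        have hAs : Asum l (7 + (m + 1)) = Asum l (7 + m) + (cGT (l.getD i 0) (chain l r t) : Int) := by
          have := Asum_succ l (7 + m)
          rw [show 7 + (m + 1) = (7 + m) + 1 from rfl, this, ← hi, ← hr, ← ht]
        rw [hAs, hcg]
        simp only [hi]
        push_cast
        ring

-- B-side: the inner counting loop as countP
lemma foldl_if_count (p : Nat → Bool) (xs : List Nat) (c : Int) :
    xs.foldl (fun a i => if p i then a + 1 else a) c = c + (xs.countP p : Int) := by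
  induction xs generalizing c with
  | nil => simp
  | cons x xs ih =>
      by_cases hx : p x
      · simp [hx, ih]; ring
      · simp [hx, ih]

lemma range'_step7 (t : Nat) : ∀ r : Nat, List.range' r t 7 = (List.range t).map (fun s => r + 7 * s) := by
  induction t with
  | zero => intro r; simp
  | succ t ih =>
      intro r
      rw [List.range'_succ, ih (r + 7), List.range_succ_eq_map, List.map_cons, List.map_map]
      simp only [Nat.mul_zero, Nat.add_zero]
      congr 1
      exact List.map_congr_left (fun s _ => by simp [Function.comp]; omega)

-- each B inner loop computes the corresponding A-side inversion term
lemma b_inner (l : List Int) (j : Nat) (acc : Int) :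
    (List.range' (j % 7) (j / 7) 7).foldl
      (fun a i => if decide (l.getD j 0 < l.getD i 0) then a + 1 else a) acc
    = acc + (cGT (l.getD j 0) (chain l (j % 7) (j / 7)) : Int) := by
  rw [foldl_if_count, range'_step7]
  simp only [cGT, chain, List.countP_map]
  rfl

lemma b_outer (l : List Int) (n : Nat) (acc : Int) :
    (List.range n).foldl
      (fun acc j => (List.range' (j % 7) (j / 7) 7).foldl
        (fun a i => if decide (l.getD j 0 < l.getD i 0) then a + 1 else a) acc)
      acc = acc + Asum l n := by
  induction n generalizing acc with
  | zero => simp [Asum]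
  | succ n ih =>
      rw [List.range_succ, List.foldl_append]
      simp only [List.foldl_cons, List.foldl_nil]
      rw [b_inner, ih, Asum_succ]
      ring

lemma shell7_alt_eq (l : List Int) : shell7_alt l = Asum l l.length + max ((l.length : Int) - 7) 0 := by
  simp only [shell7_alt]
  rw [b_outer]
  ring_nf

-- ===== VERDICT (by name: the statement is the Claim_ definition above) =====
theorem shell7_spec : Claim_equal_shell7 := by
  unfold Claim_equal_shell7
  intro l _
  unfold Spec_shell7
  rw [shell7_alt_eq]
  by_cases hn : 7 ≤ l.length
  · have := (outer_inv l (l.length - 7) (by omega)).2.2.2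
    unfold shell7
    rw [show 7 + (l.length - 7) = l.length from by omega] at this
    rw [this]
    have hmax : max ((l.length : Int) - 7) 0 = (l.length : Int) - 7 := by
      have : (7 : Int) ≤ (l.length : Int) := by exact_mod_cast hn
      omega
    rw [hmax]
    ring
  · unfold shell7
    have h0 : l.length - 7 = 0 := by omega
    rw [h0]
    simp only [List.range'_zero, List.foldl_nil]
    have hA : Asum l l.length = 0 := Asum_of_le7 l l.length (by omega)
    have hmax : max ((l.length : Int) - 7) 0 = 0 := by
      have : (l.length : Int) < 7 := by exact_mod_cast (by omega : l.length < 7)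
      omega
    rw [hA, hmax]
    norm_num
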